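-- pv_equiv track=rewrite | github.com/LucasAlegre/advent-of-code-2019 | day04.py | valid_password
-- ===== SOURCE A (Python) =====
-- def valid_password(x):
--
--     for i in range(len(x)-1):
--         if x[i] > x[i+1]:
--             return False
--
--     for i in range(len(x)-1):
--         for i in range(len(x)-1):
--             if x[i] == x[i+1]:
--                 if (i > 0 and x[i-1] == x[i]) or (i < len(x) - 2 and x[i+2] == x[i+1]):
--                     continue
--                 else:
--                     return True
-- ===== SOURCE B (Python) =====
-- def valid_password(x):
--     pairs = list(zip(x, x[1:]))
--     for a, b in pairs:
--         if a > b: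
--             return False
--     run = 1
--     for a, b in pairs:
--         if a == b:
--             run += 1
--         else:
--             if run == 2:
--                 return True
--             run = 1
--     if run == 2:
--         return True
-- ===== Notes on version B (the rewrite author's own statement) =====
-- stated objective: faster
-- what changed: The redundant doubly-nested index scan with neighbor lookups is replaced by a single run-length pass over adjacent pairs (zip) that reports True when a run of equal characters ends with length exactly 2; the monotonic guard becomes a scan over the same zipped pairs.
import Mathlib
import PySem

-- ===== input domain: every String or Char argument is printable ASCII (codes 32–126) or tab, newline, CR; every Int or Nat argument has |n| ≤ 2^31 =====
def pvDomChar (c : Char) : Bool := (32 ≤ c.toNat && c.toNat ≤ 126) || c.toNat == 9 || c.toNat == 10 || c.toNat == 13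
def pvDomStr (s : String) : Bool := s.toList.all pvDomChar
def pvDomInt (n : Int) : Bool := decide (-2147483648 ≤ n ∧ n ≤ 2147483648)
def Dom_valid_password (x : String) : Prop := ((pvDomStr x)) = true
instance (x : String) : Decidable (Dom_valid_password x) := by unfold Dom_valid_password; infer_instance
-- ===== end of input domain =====

-- B replaces A's redundant nested adjacent-pair scan by one run-length pass over zipped
-- neighbours (idiomatic single pass); return value proved equal, incl. the implicit None.

-- ===== PORT A =====
-- first loop: return False on the first decreasing adjacent pair
-- (indices i and i+1 produced by range(len(x)-1) are always in range, so pyGetD is exact)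
def vpA1 (cs : List Char) : List Int → Bool
  | [] => false
  | i :: rest =>
    if PySem.List.pyGetD cs i ' ' > PySem.List.pyGetD cs (i + 1) ' ' then true
    else vpA1 cs rest

-- inner copy of the second loop (the shadowed `for i in range(len(x)-1)`);
-- `none` = the loop ran to completion without returning
-- (the i-1 lookup is guarded by `i > 0` and the i+2 lookup by `i < n-2`, as in Python)
def vpA2inner (cs : List Char) (n : Int) : List Int → Option Bool
  | [] => none
  | i :: rest =>
    if PySem.List.pyGetD cs i ' ' == PySem.List.pyGetD cs (i + 1) ' ' then
      if (decide (i > 0) && (PySem.List.pyGetD cs (i - 1) ' ' == PySem.List.pyGetD cs i ' '))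
          || (decide (i < n - 2) && (PySem.List.pyGetD cs (i + 2) ' ' == PySem.List.pyGetD cs (i + 1) ' ')) then
        vpA2inner cs n rest
      else some true
    else vpA2inner cs n rest

-- outer copy of the second loop: runs the inner loop once per iteration
def vpA2outer (cs : List Char) (n : Int) (full : List Int) : List Int → Option Bool
  | [] => none
  | _ :: rest =>
    match vpA2inner cs n full with
    | some r => some r
    | none => vpA2outer cs n full rest

def valid_password (x : String) : Option Bool :=
  let cs := x.toList
  let n : Int := cs.length
  if vpA1 cs (PySem.List.pyRange 0 (n - 1) 1) then some false
  else vpA2outer cs n (PySem.List.pyRange 0 (n - 1) 1) (PySem.List.pyRange 0 (n - 1) 1)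

-- ===== PORT B =====
-- first loop of Source B: any decreasing pair among zip(x, x[1:])
def vpB1 : List (Char × Char) → Bool
  | [] => false
  | (a, b) :: rest => if a > b then true else vpB1 rest

-- run-length pass of Source B, including the trailing `if run == 2: return True`
def vpB2 : List (Char × Char) → Int → Option Bool
  | [], run => if run == 2 then some true else none
  | (a, b) :: rest, run =>
    if a == b then vpB2 rest (run + 1)
    else if run == 2 then some true
    else vpB2 rest 1

def valid_password_alt (x : String) : Option Bool :=
  let cs := x.toList
  let pairs := cs.zip cs.tail   -- list(zip(x, x[1:]))
  if vpB1 pairs then some false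
  else vpB2 pairs 1

-- ===== PRECONDITION & SPEC =====
def Spec_valid_password (x : String) (out : Option Bool) : Prop := out = valid_password_alt x
instance (x : String) (out : Option Bool) : Decidable (Spec_valid_password x out) := by unfold Spec_valid_password; infer_instance

-- ===== CLAIM (what is proved, stated in full; the proofs are below) =====
def Claim_equal_valid_password : Prop := ∀ (x : String), Dom_valid_password x → Spec_valid_password x (valid_password x)

-- ===== LEMMAS AND PROOFS =====

-- the boolean test of A's inner loop at integer index i
def gInt (cs : List Char) (n : Int) (i : Int) : Bool :=
  (PySem.List.pyGetD cs i ' ' == PySem.List.pyGetD cs (i + 1) ' ') &&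
  !((decide (i > 0) && (PySem.List.pyGetD cs (i - 1) ' ' == PySem.List.pyGetD cs i ' '))
    || (decide (i < n - 2) && (PySem.List.pyGetD cs (i + 2) ' ' == PySem.List.pyGetD cs (i + 1) ' ')))

-- the same test at Nat index k, with a virtual predecessor `prev` standing for the
-- character to the left of index 0 (used to reason about suffixes of the list)
def gP (prev : Option Char) (cs : List Char) (k : Nat) : Bool :=
  (cs.getD k ' ' == cs.getD (k+1) ' ') &&
  !(((if k = 0 then prev else some (cs.getD (k-1) ' ')) == some (cs.getD k ' '))
    || (decide (k + 2 < cs.length) && (cs.getD (k+2) ' ' == cs.getD (k+1) ' ')))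

theorem any_ext {α : Type} (l : List α) (f g : α → Bool) (h : ∀ a, f a = g a) :
    l.any f = l.any g := by
  induction l with
  | nil => rfl
  | cons a t ih => simp only [List.any_cons, h a, ih]

theorem vpA1_any (cs : List Char) (is : List Int) :
    vpA1 cs is = is.any (fun i => decide (PySem.List.pyGetD cs i ' ' > PySem.List.pyGetD cs (i + 1) ' ')) := by
  induction is with
  | nil => rfl
  | cons i rest ih =>
    by_cases h : PySem.List.pyGetD cs i ' ' > PySem.List.pyGetD cs (i + 1) ' ' <;>
      simp [vpA1, ih, h]

theorem vpA2inner_any (cs : List Char) (n : Int) (is : List Int) :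
    vpA2inner cs n is = (if is.any (gInt cs n) then some true else none) := by
  induction is with
  | nil => rfl
  | cons i rest ih =>
    cases h1 : (PySem.List.pyGetD cs i ' ' == PySem.List.pyGetD cs (i + 1) ' ') with
    | false => simp [vpA2inner, ih, gInt, h1]
    | true =>
      cases h2 : ((decide (i > 0) && (PySem.List.pyGetD cs (i - 1) ' ' == PySem.List.pyGetD cs i ' '))
          || (decide (i < n - 2) && (PySem.List.pyGetD cs (i + 2) ' ' == PySem.List.pyGetD cs (i + 1) ' '))) with
      | false => simp [vpA2inner, ih, gInt, h1, h2]
      | true => simp [vpA2inner, ih, gInt, h1, h2]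

theorem vpA2outer_none (cs : List Char) (n : Int) (full : List Int)
    (h : vpA2inner cs n full = none) (rest : List Int) :
    vpA2outer cs n full rest = none := by
  induction rest with
  | nil => rfl
  | cons i r ih => simp [vpA2outer, h, ih]

theorem vpA2outer_eq (cs : List Char) (n : Int) (R : List Int) :
    vpA2outer cs n R R = (if R.any (gInt cs n) then some true else none) := by
  cases R with
  | nil => rfl
  | cons i rest =>
    by_cases h : (i :: rest).any (gInt cs n) = true
    · have hin : vpA2inner cs n (i :: rest) = some true := by
        rw [vpA2inner_any]; simp [h]
      simp [vpA2outer, hin, h]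
    · have h' : (i :: rest).any (gInt cs n) = false := by simpa using h
      have hin : vpA2inner cs n (i :: rest) = none := by
        rw [vpA2inner_any, h']; rfl
      rw [vpA2outer_none cs n _ hin, h']
      rfl

-- pointwise bridges Int index → Nat index
theorem ptw1 (cs : List Char) (k : Nat) :
    decide (PySem.List.pyGetD cs (k : Int) ' ' > PySem.List.pyGetD cs ((k : Int) + 1) ' ')
      = decide (cs.getD k ' ' > cs.getD (k+1) ' ') := by
  rw [show ((k:Int) + 1) = (((k+1 : Nat)) : Int) by omega,
    PySem.List.pyGetD_natCast, PySem.List.pyGetD_natCast]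

theorem ptw2 (cs : List Char) (k : Nat) :
    gInt cs (cs.length : Int) (k : Int) = gP none cs k := by
  cases k with
  | zero =>
    unfold gInt gP
    rw [show (((0:Nat):Int) + 1) = ((1 : Nat) : Int) by omega,
      show (((0:Nat):Int) + 2) = ((2 : Nat) : Int) by omega,
      show (decide (((0:Nat):Int) > 0)) = false by simp,
      show (decide (((0:Nat):Int) < (cs.length : Int) - 2)) = decide (0 + 2 < cs.length) by
        simp only [decide_eq_decide]; omega,
      PySem.List.pyGetD_natCast, PySem.List.pyGetD_natCast, PySem.List.pyGetD_natCast]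
    simp
  | succ j =>
    unfold gInt gP
    rw [show (((j+1:Nat):Int) + 1) = ((j+2 : Nat) : Int) by omega,
      show (((j+1:Nat):Int) + 2) = ((j+3 : Nat) : Int) by omega,
      show (((j+1:Nat):Int) - 1) = ((j : Nat) : Int) by omega,
      show (decide (((j+1:Nat):Int) > 0)) = true by simp,
      show (decide (((j+1:Nat):Int) < (cs.length : Int) - 2)) = decide (j + 1 + 2 < cs.length) by
        simp only [decide_eq_decide]; omega,
      PySem.List.pyGetD_natCast, PySem.List.pyGetD_natCast, PySem.List.pyGetD_natCast,
      PySem.List.pyGetD_natCast]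
    simp

-- structural lemma for part 1
theorem L1 (cs : List Char) :
    (List.range (cs.length - 1)).any (fun k => decide (cs.getD k ' ' > cs.getD (k+1) ' '))
      = vpB1 (cs.zip cs.tail) := by
  induction cs with
  | nil => rfl
  | cons a t ih =>
    cases t with
    | nil => rfl
    | cons b u =>
      rw [show ((a :: b :: u).length - 1) = ((b :: u).length - 1) + 1 by simp,
        List.range_succ_eq_map]
      simp only [List.any_cons, List.any_map]
      rw [show vpB1 ((a :: b :: u).zip (a :: b :: u).tail)
            = (if a > b then true else vpB1 ((b :: u).zip u)) from rfl]
      have hsh : ((List.range ((b :: u).length - 1)).any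
            ((fun k => decide ((a :: b :: u).getD k ' ' > (a :: b :: u).getD (k+1) ' ')) ∘ Nat.succ))
          = (List.range ((b :: u).length - 1)).any
            (fun k => decide ((b :: u).getD k ' ' > (b :: u).getD (k+1) ' ')) := by
        apply any_ext
        intro k
        simp [Function.comp, List.getD_cons_succ]
      rw [hsh, ih]
      by_cases h : a > b <;> simp [h]

-- shift lemma for gP
theorem gP_shift (pv : Option Char) (a b : Char) (t : List Char) (k : Nat) :
    gP pv (a :: b :: t) (k + 1) = gP (if a == b then some b else none) (b :: t) k := by
  unfold gP
  have hl : decide (k + 1 + 2 < (a :: b :: t).length) = decide (k + 2 < (b :: t).length) := by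
    simp only [decide_eq_decide, List.length_cons]; omega
  rw [hl]
  cases k with
  | zero =>
    cases h : (a == b) with
    | true => simp [List.getD_cons_succ, h]
    | false => simp [List.getD_cons_succ, h]
  | succ j =>
    simp [List.getD_cons_succ]

-- invariant for B's run-length pass: `run` is the length of the current run of equal
-- characters ending just before `cs`, whose character is `a`
theorem vpB2_key (cs : List Char) (a : Char) (run : Int) (h : 1 ≤ run) :
    vpB2 ((a :: cs).zip cs) run =
      (if ((run = 2 ∧ cs.head? ≠ some a) ∨
           ((List.range cs.length).any (gP (if 2 ≤ run then some a else none) (a :: cs)) = true))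
       then some true else none) := by
  induction cs generalizing a run with
  | nil =>
    simp only [List.zip_nil_right, vpB2]
    by_cases h2 : run = 2 <;> simp [h2]
  | cons b t ih =>
    rw [show (a :: b :: t).zip (b :: t) = (a, b) :: ((b :: t).zip t) from rfl]
    simp only [List.length_cons, List.range_succ_eq_map, List.any_cons, List.any_map]
    have hsh : ((List.range t.length).any
          ((gP (if 2 ≤ run then some a else none) (a :: b :: t)) ∘ Nat.succ))
        = (List.range t.length).any (gP (if a == b then some b else none) (b :: t)) := by
      apply any_ext
      intro k
      simp only [Function.comp]
      exact gP_shift _ a b t k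
    rw [hsh]
    cases hab : (a == b) with
    | true =>
      have hab' : a = b := by simpa using hab
      rw [show vpB2 ((a, b) :: ((b :: t).zip t)) run
            = (if a == b then vpB2 ((b :: t).zip t) (run + 1)
               else if run == 2 then some true else vpB2 ((b :: t).zip t) 1) from rfl]
      rw [hab]
      simp only [if_true]
      rw [ih b (run + 1) (by omega)]
      have hg0 : gP (if 2 ≤ run then some a else none) (a :: b :: t) 0
          = (!(decide (2 ≤ run)) && !(decide (0 < t.length) && (t.getD 0 ' ' == b))) := by
        unfold gP
        subst hab'
        have : decide (0 + 2 < (a :: a :: t).length) = decide (0 < t.length) := by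
          simp only [decide_eq_decide]; simp
        rw [this]
        cases hr : decide (2 ≤ run) <;> simp_all
      rw [hg0]
      have hrun2 : run + 1 = 2 ↔ ¬ (2 ≤ run) := by omega
      have hhd : t.head? = some b ↔ (0 < t.length ∧ t.getD 0 ' ' = b) := by
        cases t <;> simp
      have hp1 : (2:Int) ≤ run + 1 := by omega
      by_cases h2r : (2:Int) ≤ run <;>
        by_cases hcont : t.head? = some b <;>
          by_cases hany : (List.range t.length).any (gP (some b) (b :: t)) = true <;>
            simp_all <;>
            first
            | (obtain ⟨hl, he⟩ := hhd
               have ht0 : t[0] = b := by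
                 rwa [List.getElem?_eq_getElem hl, Option.getD_some] at he
               simp [ht0])
            | (intro hne
               cases t with
               | nil => exact absurd rfl hne
               | cons c u => simp_all)
    | false =>
      have hab' : a ≠ b := by simpa using hab
      rw [show vpB2 ((a, b) :: ((b :: t).zip t)) run
            = (if a == b then vpB2 ((b :: t).zip t) (run + 1)
               else if run == 2 then some true else vpB2 ((b :: t).zip t) 1) from rfl]
      rw [hab]
      simp only [Bool.false_eq_true, if_false]
      have hg0 : gP (if 2 ≤ run then some a else none) (a :: b :: t) 0 = false := by
        unfold gP
        cases hr : decide (2 ≤ run) <;> simp_all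
      rw [hg0]
      rw [ih b 1 (by omega)]
      have hhd : (b :: t).head? ≠ some a := by
        simp only [List.head?_cons]
        exact fun hc => hab' (by injection hc with h'; exact h'.symm)
      by_cases hr2 : run = 2 <;>
        by_cases hany : (List.range t.length).any (gP none (b :: t)) = true <;>
          simp_all

-- combined list-level lemmas
theorem part1 (cs : List Char) :
    vpA1 cs (PySem.List.pyRange 0 ((cs.length : Int) - 1) 1) = vpB1 (cs.zip cs.tail) := by
  rw [vpA1_any, PySem.List.pyRange_one, List.any_map]
  have hlen : (((cs.length : Int) - 1 - 0)).toNat = cs.length - 1 := by omega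
  rw [hlen, ← L1 cs]
  exact any_ext _ _ _ (fun k => by simp only [Function.comp_apply, zero_add]; exact ptw1 cs k)

theorem part2 (cs : List Char) :
    vpA2outer cs (cs.length : Int) (PySem.List.pyRange 0 ((cs.length : Int) - 1) 1)
        (PySem.List.pyRange 0 ((cs.length : Int) - 1) 1)
      = vpB2 (cs.zip cs.tail) 1 := by
  rw [vpA2outer_eq, PySem.List.pyRange_one, List.any_map]
  have hlen : (((cs.length : Int) - 1 - 0)).toNat = cs.length - 1 := by omega
  rw [hlen]
  have hpt : (List.range (cs.length - 1)).any ((gInt cs (cs.length : Int)) ∘ (fun k : Nat => (0:Int) + k))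
      = (List.range (cs.length - 1)).any (gP none cs) :=
    any_ext _ _ _ (fun k => by simp only [Function.comp_apply, zero_add]; exact ptw2 cs k)
  rw [hpt]
  cases cs with
  | nil => rfl
  | cons a t =>
    rw [show ((a :: t).length - 1) = t.length by simp, show (a :: t).tail = t from rfl]
    rw [vpB2_key t a 1 (by norm_num)]
    have h2 : ¬(2 ≤ (1:Int)) := by norm_num
    simp [h2]

theorem main_eq (cs : List Char) :
    (if vpA1 cs (PySem.List.pyRange 0 ((cs.length : Int) - 1) 1) then some false
     else vpA2outer cs (cs.length : Int) (PySem.List.pyRange 0 ((cs.length : Int) - 1) 1)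
        (PySem.List.pyRange 0 ((cs.length : Int) - 1) 1))
      = (if vpB1 (cs.zip cs.tail) then some false else vpB2 (cs.zip cs.tail) 1) := by
  rw [part1]
  by_cases h : vpB1 (cs.zip cs.tail) <;> simp [h, part2]

-- ===== VERDICT (by name: the statement is the Claim_ definition above) =====
theorem valid_password_spec : Claim_equal_valid_password := by
  intro x _
  show valid_password x = valid_password_alt x
  exact main_eq x.toList
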